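-- pv_equiv track=rewrite | github.com/CesareSwift/Tri-gram-Language-Model | code/find-alpha.py | preprocess_line
-- ===== SOURCE A (Python) =====
-- def preprocess_line(text_line):
--     #using chr to get a-z from ASCII
--     list1 = [chr(i) for i in range(97, 123)]
--     #using chr to get A-Z from ASCII
--     list2 = [chr(i) for i in range(65, 91)]
--     #using chr to get 0-9 from ASCII
--     list3 = [chr(i) for i in range(48,58)]
--     #a list contains '.' and ' '
--     list4 = ['.',' ']
--     clist = list1 + list2 + list3 + list4
--     #remove all the characters not in character list
--     #text_line = "".join(chs for chs in text_line.replace('\n',' ') if chs in clist )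
--     text_line = "".join(chs for chs in text_line if chs in clist )
--     #text_line = "".join(chs for chs in text_line.replace('?', ' ') if chs in clist )
--     #lowercase all the remaining characters
--     text_line = text_line.lower()
--     #convert all digits to '0'
--     for i in range(9):
--         text_line = text_line.replace(str(i+1),"0")
--     #add two '#' in front of text_line and one '#' behind of the text_line
--     text_line = '##' + text_line + '#'
--     #return the line after preprocessing
--     return text_line
-- ===== SOURCE B (Python) =====
-- def preprocess_line(text_line):
--     out = []
--     for c in text_line:
--         if 'a' <= c <= 'z' or 'A' <= c <= 'Z':
--             out.append(c.lower())
--         elif '0' <= c <= '9':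
--             out.append('0')
--         elif c == '.' or c == ' ':
--             out.append(c)
--     return '##' + ''.join(out) + '#'
-- ===== Notes on version B (the rewrite author's own statement) =====
-- stated objective: simpler
-- what changed: A builds a 62-character allowlist and makes twelve passes over the string (filter-join, lowercasing, nine digit-replace passes); B classifies each character once in a single loop with explicit ASCII range checks, emitting its lowercase form, a zero for any digit, or the kept punctuation, and skipping everything else.
import Mathlib
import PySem

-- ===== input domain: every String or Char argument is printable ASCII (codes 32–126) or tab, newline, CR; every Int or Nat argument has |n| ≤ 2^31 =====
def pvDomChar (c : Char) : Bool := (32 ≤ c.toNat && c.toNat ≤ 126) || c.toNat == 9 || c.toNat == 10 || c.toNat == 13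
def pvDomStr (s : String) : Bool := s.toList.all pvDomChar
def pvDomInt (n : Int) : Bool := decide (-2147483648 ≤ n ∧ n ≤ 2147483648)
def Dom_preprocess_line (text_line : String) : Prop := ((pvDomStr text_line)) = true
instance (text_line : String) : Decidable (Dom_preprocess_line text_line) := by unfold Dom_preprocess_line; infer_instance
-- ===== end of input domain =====

-- B replaces A's filter-join + .lower() + nine .replace() passes by a single classifying pass
-- over the characters (objective: simpler, one traversal instead of twelve).

-- ===== PORT A =====
-- chr(i) for the ASCII ranges used here is ported by hand as Char.ofNat i.toNat (exact: i ∈ 48..122);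
-- '+' on str is list concatenation on the code points.
def preprocess_line (text_line : String) : String :=
  let list1 := (PySem.List.pyRange 97 123 1).map (fun i => Char.ofNat i.toNat)
  let list2 := (PySem.List.pyRange 65 91 1).map (fun i => Char.ofNat i.toNat)
  let list3 := (PySem.List.pyRange 48 58 1).map (fun i => Char.ofNat i.toNat)
  let list4 : List Char := ['.', ' ']
  let clist := list1 ++ list2 ++ list3 ++ list4
  let t1 : List Char := text_line.toList.filter (fun chs => clist.contains chs)
  let t2 := PySem.Chars.lower t1
  let t3 := (PySem.List.pyRange 0 9 1).foldl
    (fun s i => PySem.Chars.replace s (PySem.Int.toStr (i + 1)).toList ['0']) t2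
  String.ofList ('#' :: '#' :: (t3 ++ ['#']))

-- ===== PORT B =====
def preprocess_line_alt (text_line : String) : String :=
  let out := text_line.toList.foldl (fun out c =>
    if ('a' ≤ c ∧ c ≤ 'z') ∨ ('A' ≤ c ∧ c ≤ 'Z') then out ++ PySem.Chars.lower [c]
    else if ('0' ≤ c ∧ c ≤ '9') then out ++ ['0']
    else if c = '.' ∨ c = ' ' then out ++ [c]
    else out) []
  String.ofList ('#' :: '#' :: (PySem.Chars.join [] (out.map (fun c => [c])) ++ ['#']))

-- ===== PRECONDITION & SPEC =====
def Spec_preprocess_line (text_line : String) (out : String) : Prop := out = preprocess_line_alt text_line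
instance (text_line : String) (out : String) : Decidable (Spec_preprocess_line text_line out) := by unfold Spec_preprocess_line; infer_instance

-- ===== CLAIM (what is proved, stated in full; the proofs are below) =====
def Claim_equal_preprocess_line : Prop := ∀ (text_line : String), Dom_preprocess_line text_line → Spec_preprocess_line text_line (preprocess_line text_line)

-- ===== LEMMAS AND PROOFS =====

-- the per-character classifier B's loop body appends
def pvClassify (c : Char) : List Char :=
  if ('a' ≤ c ∧ c ≤ 'z') ∨ ('A' ≤ c ∧ c ≤ 'Z') then PySem.Chars.lower [c]
  else if ('0' ≤ c ∧ c ≤ '9') then ['0']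
  else if c = '.' ∨ c = ' ' then [c]
  else []

def pvClist : List Char :=
  (PySem.List.pyRange 97 123 1).map (fun i => Char.ofNat i.toNat) ++
  (PySem.List.pyRange 65 91 1).map (fun i => Char.ofNat i.toNat) ++
  (PySem.List.pyRange 48 58 1).map (fun i => Char.ofNat i.toNat) ++ ['.', ' ']

def pvSub (d c : Char) : Char := if c = d then '0' else c

theorem pv_char_eq_iff (c d : Char) : c = d ↔ c.toNat = d.toNat := by
  constructor
  · intro h; rw [h]
  · intro h; exact Char.ext (UInt32.toNat_inj.mp h)

theorem pv_char_le_iff (c d : Char) : c ≤ d ↔ c.toNat ≤ d.toNat := by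
  rw [Char.le_def, UInt32.le_iff_toNat_le]; rfl

theorem pv_replace_go_single (d e : Char) : ∀ (l acc : List Char) (fuel : Nat),
    l.length ≤ fuel →
    PySem.Chars.replace.go [d] [e] fuel l acc
      = acc.reverse ++ l.map (fun c => if c = d then e else c) := by
  intro l
  induction l with
  | nil =>
    intro acc fuel _
    cases fuel <;> simp [PySem.Chars.replace.go]
  | cons c t ih =>
    intro acc fuel hf
    cases fuel with
    | zero => simp at hf
    | succ n =>
      by_cases h : c = d
      · subst h
        have hpre : List.isPrefixOf [c] (c :: t) = true := by
          simp [List.isPrefixOf]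
        rw [PySem.Chars.replace.go, if_pos hpre]
        simp only [List.length_cons] at hf
        simp only [List.length_cons, List.length_nil, List.drop_succ_cons, List.drop_zero]
        rw [ih _ _ (by omega)]
        simp
      · have hpre : List.isPrefixOf [d] (c :: t) = false := by
          simp [List.isPrefixOf]; exact fun he => h he.symm
        rw [PySem.Chars.replace.go, if_neg (by simp [hpre])]
        simp only [List.length_cons] at hf
        rw [ih _ _ (by omega)]
        simp [h]

theorem pv_replace_single (d e : Char) (l : List Char) :
    PySem.Chars.replace l [d] [e] = l.map (fun c => if c = d then e else c) := by
  rw [PySem.Chars.replace]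
  simp only [List.isEmpty_cons]
  rw [pv_replace_go_single d e l [] l.length (le_refl _)]
  simp

theorem pv_mem_mapRange (a b : Nat) (hb : b ≤ 0xd800) (c : Char) :
    c ∈ (PySem.List.pyRange (a : Int) (b : Int) 1).map (fun i => Char.ofNat i.toNat) ↔
      a ≤ c.toNat ∧ c.toNat < b := by
  rw [List.mem_map]
  constructor
  · rintro ⟨i, hi, rfl⟩
    rw [PySem.List.mem_pyRange_one] at hi
    have h0 : (a : Int) ≤ i ∧ i < (b : Int) := hi
    have hv : (i.toNat).isValidChar := by left; omega
    rw [Char.toNat_ofNat, if_pos hv]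
    omega
  · rintro ⟨h1, h2⟩
    refine ⟨(c.toNat : Int), PySem.List.mem_pyRange_one.mpr ⟨by omega, by omega⟩, ?_⟩
    have hv : (c.toNat).isValidChar := by left; omega
    rw [pv_char_eq_iff, Char.toNat_ofNat]
    simp [hv]

theorem pv_lit :
    '0'.toNat = 48 ∧ '1'.toNat = 49 ∧ '2'.toNat = 50 ∧ '3'.toNat = 51 ∧ '4'.toNat = 52 ∧
    '5'.toNat = 53 ∧ '6'.toNat = 54 ∧ '7'.toNat = 55 ∧ '8'.toNat = 56 ∧ '9'.toNat = 57 ∧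
    'a'.toNat = 97 ∧ 'z'.toNat = 122 ∧ 'A'.toNat = 65 ∧ 'Z'.toNat = 90 ∧
    '.'.toNat = 46 ∧ ' '.toNat = 32 := by decide

theorem pv_contains_iff (c : Char) :
    pvClist.contains c = true ↔
      (97 ≤ c.toNat ∧ c.toNat ≤ 122) ∨ (65 ≤ c.toNat ∧ c.toNat ≤ 90) ∨
      (48 ≤ c.toNat ∧ c.toNat ≤ 57) ∨ c.toNat = 46 ∨ c.toNat = 32 := by
  rw [List.contains_iff_mem, pvClist]
  simp only [List.mem_append, List.mem_cons, List.not_mem_nil, or_false]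
  rw [show ((97 : Int)) = ((97 : Nat) : Int) from rfl]
  rw [show ((123 : Int)) = ((123 : Nat) : Int) from rfl]
  rw [show ((65 : Int)) = ((65 : Nat) : Int) from rfl]
  rw [show ((91 : Int)) = ((91 : Nat) : Int) from rfl]
  rw [show ((48 : Int)) = ((48 : Nat) : Int) from rfl]
  rw [show ((58 : Int)) = ((58 : Nat) : Int) from rfl]
  rw [pv_mem_mapRange 97 123 (by norm_num), pv_mem_mapRange 65 91 (by norm_num),
    pv_mem_mapRange 48 58 (by norm_num), pv_char_eq_iff, pv_char_eq_iff]
  have hl := pv_lit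
  omega

-- the nine replace passes are the identity on a character that is not one of '1'..'9'
theorem pv_subchain_eq (c : Char) (h : ¬ (49 ≤ c.toNat ∧ c.toNat ≤ 57)) :
    pvSub '9' (pvSub '8' (pvSub '7' (pvSub '6' (pvSub '5' (pvSub '4' (pvSub '3' (pvSub '2' (pvSub '1' c)))))))) = c := by
  have hl := pv_lit
  have h1 : ∀ d : Char, 49 ≤ d.toNat → d.toNat ≤ 57 → pvSub d c = c := by
    intro d h49 h57
    rw [pvSub, if_neg]
    rw [pv_char_eq_iff]; omega
  rw [h1 '1' (by omega) (by omega), h1 '2' (by omega) (by omega), h1 '3' (by omega) (by omega),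
    h1 '4' (by omega) (by omega), h1 '5' (by omega) (by omega), h1 '6' (by omega) (by omega),
    h1 '7' (by omega) (by omega), h1 '8' (by omega) (by omega), h1 '9' (by omega) (by omega)]

theorem pv_pointwise (c : Char) :
    (if pvClist.contains c then
       [pvSub '9' (pvSub '8' (pvSub '7' (pvSub '6' (pvSub '5' (pvSub '4' (pvSub '3' (pvSub '2' (pvSub '1' (PySem.Chars.lowerChar c)))))))))]
     else []) = pvClassify c := by
  have hl := pv_lit
  by_cases hmem : pvClist.contains c = true
  · rw [if_pos hmem]
    rw [pv_contains_iff] at hmem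
    rcases hmem with h|h|h|h|h
    · -- lowercase letter
      have hlo : PySem.Chars.lowerChar c = c := by
        rw [PySem.Chars.lowerChar, if_neg]
        simp only [PySem.Chars.isupper, Bool.and_eq_true, decide_eq_true_eq, pv_char_le_iff]
        omega
      rw [hlo, pv_subchain_eq c (by omega), pvClassify,
        if_pos (Or.inl ⟨by rw [pv_char_le_iff]; omega, by rw [pv_char_le_iff]; omega⟩)]
      simp [PySem.Chars.lower, hlo]
    · -- uppercase letter
      have hup : PySem.Chars.isupper c = true := by
        simp only [PySem.Chars.isupper, Bool.and_eq_true, decide_eq_true_eq, pv_char_le_iff]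
        omega
      have hval : (c.toNat + 32).isValidChar := by
        left; omega
      have hlt : (PySem.Chars.lowerChar c).toNat = c.toNat + 32 := by
        rw [PySem.Chars.lowerChar, if_pos hup, Char.toNat_ofNat, if_pos hval]
      rw [pv_subchain_eq _ (by omega), pvClassify,
        if_pos (Or.inr ⟨by rw [pv_char_le_iff]; omega, by rw [pv_char_le_iff]; omega⟩)]
      simp [PySem.Chars.lower]
    · -- digit
      have hd : c = '0' ∨ c = '1' ∨ c = '2' ∨ c = '3' ∨ c = '4' ∨ c = '5' ∨ c = '6' ∨ c = '7' ∨ c = '8' ∨ c = '9' := by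
        simp only [pv_char_eq_iff]; omega
      rcases hd with h|h|h|h|h|h|h|h|h|h <;> subst h <;> decide
    · -- '.'
      have hc : c = '.' := by rw [pv_char_eq_iff]; omega
      subst hc; decide
    · -- ' '
      have hc : c = ' ' := by rw [pv_char_eq_iff]; omega
      subst hc; decide
  · rw [if_neg hmem]
    have h : ¬ ((97 ≤ c.toNat ∧ c.toNat ≤ 122) ∨ (65 ≤ c.toNat ∧ c.toNat ≤ 90) ∨
        (48 ≤ c.toNat ∧ c.toNat ≤ 57) ∨ c.toNat = 46 ∨ c.toNat = 32) := by
      rw [← pv_contains_iff]; exact hmem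
    rw [pvClassify, if_neg, if_neg, if_neg]
    · simp only [pv_char_eq_iff]; omega
    · simp only [pv_char_le_iff]; omega
    · simp only [pv_char_le_iff]; omega

theorem pv_core (l : List Char) :
    ((l.filter (fun c => pvClist.contains c)).map PySem.Chars.lowerChar).map
        (fun c => pvSub '9' (pvSub '8' (pvSub '7' (pvSub '6' (pvSub '5' (pvSub '4' (pvSub '3' (pvSub '2' (pvSub '1' c))))))))) =
      l.flatMap pvClassify := by
  induction l with
  | nil => rfl
  | cons c t ih =>
    rw [List.flatMap_cons, ← pv_pointwise c, List.filter_cons]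
    by_cases h : pvClist.contains c = true
    · simp only [if_pos h, List.map_cons, ih]
      rfl
    · simp only [if_neg h, ih, List.nil_append]

-- the nine replace passes of port A, evaluated to the composed per-character substitution
theorem pv_replaces (s : String) :
    (PySem.List.pyRange 0 9 1).foldl
        (fun t i => PySem.Chars.replace t (PySem.Int.toStr (i + 1)).toList ['0'])
        (PySem.Chars.lower (List.filter (fun chs => pvClist.contains chs) s.toList)) =
      s.toList.flatMap pvClassify := by
  rw [show PySem.List.pyRange 0 9 1 = [0,1,2,3,4,5,6,7,8] from by decide]
  simp only [List.foldl_cons, List.foldl_nil]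
  rw [show (PySem.Int.toStr (0+1)).toList = ['1'] from by decide,
    show (PySem.Int.toStr (1+1)).toList = ['2'] from by decide,
    show (PySem.Int.toStr (2+1)).toList = ['3'] from by decide,
    show (PySem.Int.toStr (3+1)).toList = ['4'] from by decide,
    show (PySem.Int.toStr (4+1)).toList = ['5'] from by decide,
    show (PySem.Int.toStr (5+1)).toList = ['6'] from by decide,
    show (PySem.Int.toStr (6+1)).toList = ['7'] from by decide,
    show (PySem.Int.toStr (7+1)).toList = ['8'] from by decide,
    show (PySem.Int.toStr (8+1)).toList = ['9'] from by decide]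
  simp only [pv_replace_single, PySem.Chars.lower]
  rw [← pv_core s.toList]
  simp only [List.map_map, Function.comp_def, pvSub]

-- B's loop, evaluated to the same flatMap
theorem pv_loopB (s : String) :
    s.toList.foldl (fun out c =>
      if ('a' ≤ c ∧ c ≤ 'z') ∨ ('A' ≤ c ∧ c ≤ 'Z') then out ++ PySem.Chars.lower [c]
      else if ('0' ≤ c ∧ c ≤ '9') then out ++ ['0']
      else if c = '.' ∨ c = ' ' then out ++ [c]
      else out) [] = s.toList.flatMap pvClassify := by
  have h : ∀ (out : List Char) (c : Char),
      (if ('a' ≤ c ∧ c ≤ 'z') ∨ ('A' ≤ c ∧ c ≤ 'Z') then out ++ PySem.Chars.lower [c]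
       else if ('0' ≤ c ∧ c ≤ '9') then out ++ ['0']
       else if c = '.' ∨ c = ' ' then out ++ [c]
       else out) = out ++ pvClassify c := by
    intro out c
    rw [pvClassify]
    split_ifs <;> simp
  rw [funext fun out => funext fun c => h out c,
    PySem.List.foldl_append_eq_flatMap]
  rfl

-- ===== VERDICT (by name: the statement is the Claim_ definition above) =====
theorem preprocess_line_spec : Claim_equal_preprocess_line := by
  intro s _
  show preprocess_line s = preprocess_line_alt s
  simp only [preprocess_line, preprocess_line_alt]
  apply congrArg
  rw [pv_loopB s, PySem.Chars.join_nil_singletons]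
  exact congrArg (fun t => '#' :: '#' :: (t ++ ['#'])) (pv_replaces s)
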